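-- pv_equiv track=rewrite | github.com/prabhatzgit/python_basics | string/maximum_repeating_character.py | find_max_repeating_char_per_index
-- ===== SOURCE A (Python) =====
-- def find_max_repeating_char_per_index(input_string):
--     """
--     Finds the character with the maximum frequency for every prefix of the
--     given input string.
--
--     For each index `i`, it considers the substring from the beginning up to
--     and including `input_string[i]`, then identifies the character that
--     appears most frequently within that prefix. If there's a tie in frequency,
--     it returns the character that appeared first alphabetically among the
--     most frequent ones.
--
--     This version achieves the goal without using collections.Counter.
--
--     Args:
--         input_string (str): The string to analyze.
--
--     Returns:
--         list: A list of tuples. Each tuple contains (index, character, count),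
--               representing the maximum repeating character and its count
--               for the prefix ending at that index.
--     """
--     results = []
--     # Use a standard dictionary to keep track of character frequencies for the current prefix
--     current_char_counts = {}
--
--     for i, char in enumerate(input_string):
--         # Update the count for the current character in the dictionary
--         current_char_counts[char] = current_char_counts.get(char, 0) + 1
--
--         if not current_char_counts:
--             # This case should only occur if the input string is empty,
--             # but for robustness, we handle it here.
--             results.append((i, '', 0))
--             continue
--
--         max_count = 0
--         max_char = ''
--
--         # List to store characters that currently have the maximum count
--         current_max_chars = []
--
--         # Iterate through the characters and their counts in the current prefix
--         for c, count in current_char_counts.items():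
--             if count > max_count:
--                 max_count = count
--                 # When a new maximum count is found, reset the list of max characters
--                 current_max_chars = [c]
--             elif count == max_count:
--                 # If the count is equal to the current max, add the character to the list
--                 current_max_chars.append(c)
--
--                 # If there are multiple characters with the same max_count,
--         # choose the alphabetically smallest one as per tie-breaking rule.
--         if current_max_chars:
--             max_char = min(current_max_chars)
--         else:
--             # Fallback if no characters have been processed (e.g., empty string case)
--             max_char = ''
--             max_count = 0
--
--         results.append((i, max_char, max_count))
--
--     return results
-- ===== SOURCE B (Python) =====
-- def find_max_repeating_char_per_index(input_string):
--     """O(n) one-pass version: incrementally maintain the running max count and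
--     the alphabetically smallest character attaining it."""
--     if not input_string:
--         return []
--     results = []
--     counts = {}
--     max_count = 0
--     best = input_string[0]
--     for i, ch in enumerate(input_string):
--         c = counts.get(ch, 0) + 1
--         counts[ch] = c
--         if c > max_count:
--             max_count = c
--             best = ch
--         elif c == max_count and ch < best:
--             best = ch
--         results.append((i, best, max_count))
--     return results
-- ===== Notes on version B (the rewrite author's own statement) =====
-- stated objective: faster
-- what changed: Instead of rescanning the whole frequency dictionary at every index to recompute the max count and the alphabetically-smallest tied character, B maintains (max_count, best_char) incrementally, updating them in O(1) per character.
import Mathlib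
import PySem

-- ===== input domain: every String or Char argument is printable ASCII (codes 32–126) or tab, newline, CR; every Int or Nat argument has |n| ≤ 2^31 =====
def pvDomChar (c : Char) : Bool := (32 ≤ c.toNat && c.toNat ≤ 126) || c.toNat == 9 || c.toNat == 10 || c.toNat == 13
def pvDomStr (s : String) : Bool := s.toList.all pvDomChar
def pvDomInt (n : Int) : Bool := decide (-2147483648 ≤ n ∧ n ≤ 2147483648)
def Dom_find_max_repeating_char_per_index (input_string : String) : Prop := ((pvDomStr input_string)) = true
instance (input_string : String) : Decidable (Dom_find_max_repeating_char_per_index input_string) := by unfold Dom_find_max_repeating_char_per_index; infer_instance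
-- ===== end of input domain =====

-- B replaces A's per-index rescan of the frequency dict by an incrementally maintained
-- (max_count, alphabetically-smallest argmax char) pair: O(n) instead of O(n*k).


-- ===== PORT A =====
-- inner loop of A: scan the dict's items tracking max_count and the list of tied chars
def fmrA_scan (l : List (Char × Int)) : Int × List Char :=
  l.foldl (fun s q =>
      if q.2 > s.1 then (q.2, [q.1])
      else if q.2 = s.1 then (s.1, s.2 ++ [q.1])
      else s)
    (0, [])

-- one iteration of A's outer loop (dict update, dead empty-dict branch, inner scan, min tie-break)
def fmrA_step (st : PySem.Dict Char Int × List (Int × String × Int)) (q : Int × Char) :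
    PySem.Dict Char Int × List (Int × String × Int) :=
  let d := st.1.insert q.2 (st.1.getD q.2 0 + 1)
  if d.items.isEmpty then (d, st.2 ++ [(q.1, "", 0)])
  else
    let s := fmrA_scan d.items
    match PySem.List.min? s.2 (fun c => c) with   -- min(current_max_chars); 1-char Python strings compare as their chars
    | some mc => (d, st.2 ++ [(q.1, String.ofList [mc], s.1)])
    | none => (d, st.2 ++ [(q.1, "", 0)])

def find_max_repeating_char_per_index (input_string : String) : List (Int × String × Int) :=
  ((PySem.List.enumerate input_string.toList 0).foldl fmrA_step (PySem.Dict.empty, [])).2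

-- ===== PORT B =====
-- one iteration of B's loop: dict update plus O(1) update of (max_count, best)
def fmrB_step (st : PySem.Dict Char Int × Int × Char × List (Int × String × Int)) (q : Int × Char) :
    PySem.Dict Char Int × Int × Char × List (Int × String × Int) :=
  let c := st.1.getD q.2 0 + 1
  let d := st.1.insert q.2 c
  let mb : Int × Char :=
    if c > st.2.1 then (c, q.2)
    else if c = st.2.1 ∧ q.2 < st.2.2.1 then (st.2.1, q.2)
    else (st.2.1, st.2.2.1)
  (d, mb.1, mb.2, st.2.2.2 ++ [(q.1, String.ofList [mb.2], mb.1)])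

def find_max_repeating_char_per_index_alt (input_string : String) : List (Int × String × Int) :=
  match input_string.toList with
  | [] => []
  | c0 :: _ =>
    ((PySem.List.enumerate input_string.toList 0).foldl fmrB_step
      (PySem.Dict.empty, 0, c0, [])).2.2.2

-- ===== PRECONDITION & SPEC =====
def Spec_find_max_repeating_char_per_index (input_string : String) (out : List (Int × String × Int)) : Prop := out = find_max_repeating_char_per_index_alt input_string
instance (input_string : String) (out : List (Int × String × Int)) : Decidable (Spec_find_max_repeating_char_per_index input_string out) := by unfold Spec_find_max_repeating_char_per_index; infer_instance

-- ===== CLAIM (what is proved, stated in full; the proofs are below) =====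
def Claim_equal_find_max_repeating_char_per_index : Prop := ∀ (input_string : String), Dom_find_max_repeating_char_per_index input_string → Spec_find_max_repeating_char_per_index input_string (find_max_repeating_char_per_index input_string)

-- ===== LEMMAS AND PROOFS =====
def fmrMaxv (l : List (Char × Int)) : Int := l.foldl (fun a q => max a q.2) 0

lemma fmr_foldl_max_init (l : List (Char × Int)) (i : Int) (hi : 0 ≤ i) :
    l.foldl (fun a q => max a q.2) i = max i (fmrMaxv l) := by
  induction l generalizing i with
  | nil => simp [fmrMaxv]; omega
  | cons q t ih =>
    simp only [fmrMaxv, List.foldl_cons] at *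
    rw [ih (max i q.2) (by omega), ih (max 0 q.2) (by omega)]
    omega

lemma fmrMaxv_append (l : List (Char × Int)) (q : Char × Int) :
    fmrMaxv (l ++ [q]) = max (fmrMaxv l) q.2 := by
  simp [fmrMaxv, List.foldl_append]

lemma fmrMaxv_le (l : List (Char × Int)) (q : Char × Int) (h : q ∈ l) : q.2 ≤ fmrMaxv l := by
  induction l with
  | nil => simp at h
  | cons a t ih =>
    rw [List.mem_cons] at h
    rcases h with h | h
    · subst h
      simp only [fmrMaxv, List.foldl_cons]
      rw [fmr_foldl_max_init _ _ (by omega)]; omega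
    · simp only [fmrMaxv, List.foldl_cons]
      rw [fmr_foldl_max_init _ _ (by omega)]
      have := ih h
      omega

lemma fmrA_scan_eq (l : List (Char × Int)) :
    fmrA_scan l = (fmrMaxv l, (l.filter (fun q => decide (q.2 = fmrMaxv l))).map Prod.fst) := by
  induction l using List.reverseRecOn with
  | nil => simp [fmrA_scan, fmrMaxv]
  | append_singleton t q ih =>
    have hmax := fmrMaxv_append t q
    simp only [fmrA_scan, List.foldl_append, List.foldl_cons, List.foldl_nil] at *
    rw [ih, hmax]
    by_cases h1 : q.2 > fmrMaxv t
    · have hm : max (fmrMaxv t) q.2 = q.2 := by omega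
      rw [hm]
      simp only [if_pos h1]
      have : (t.filter (fun p => decide (p.2 = q.2))).map Prod.fst = [] := by
        rw [List.filter_eq_nil_iff.mpr, List.map_nil]
        intro p hp
        have := fmrMaxv_le t p hp
        simp; omega
      simp [this]
    · have hm : max (fmrMaxv t) q.2 = fmrMaxv t := by omega
      rw [hm]
      simp only [if_neg h1]
      by_cases h2 : q.2 = fmrMaxv t
      · simp [h2]
      · simp [h2]
lemma fmr_foldl_min_eq (t : List Char) (x b : Char) (hb : b = x ∨ b ∈ t)
    (hx : b ≤ x) (hmin : ∀ y ∈ t, b ≤ y) : t.foldl min x = b := by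
  induction t generalizing x with
  | nil =>
    rcases hb with h | h
    · simp [h]
    · simp at h
  | cons a t ih =>
    simp only [List.foldl_cons]
    have ha : b ≤ a := hmin a (by simp)
    have hmin' : ∀ y ∈ t, b ≤ y := fun y hy => hmin y (List.mem_cons_of_mem _ hy)
    rcases hb with h | h
    · subst h
      exact ih (min b a) (Or.inl (min_eq_left ha).symm) (le_min le_rfl ha) hmin'
    · rw [List.mem_cons] at h
      rcases h with h | h
      · subst h
        exact ih (min x b) (Or.inl (min_eq_right hx).symm) (le_min hx le_rfl) hmin'
      · exact ih (min x a) (Or.inr h) (le_min hx ha) hmin'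

lemma fmr_min?_eq (L : List Char) (b : Char) (hb : b ∈ L) (hmin : ∀ x ∈ L, b ≤ x) :
    PySem.List.min? L (fun c => c) = some b := by
  cases L with
  | nil => simp at hb
  | cons x t =>
    rw [PySem.List.min?_id_cons]
    rw [List.mem_cons] at hb
    exact congrArg some (fmr_foldl_min_eq t x b hb (hmin x (by simp))
      (fun y hy => hmin y (List.mem_cons_of_mem _ hy)))
lemma fmr_counter_step (p : List Char) (c : Char) :
    (PySem.Dict.counter p).insert c ((PySem.Dict.counter p).getD c 0 + 1) =
      PySem.Dict.counter (p ++ [c]) := by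
  rw [← PySem.Dict.foldl_insert_getD_add_one_eq_counter, ← PySem.Dict.foldl_insert_getD_add_one_eq_counter,
    List.foldl_append]
  simp

lemma fmr_mem_items_counter (p : List Char) (q : Char × Int) :
    q ∈ (PySem.Dict.counter p).items ↔ q.1 ∈ p ∧ q.2 = (p.count q.1 : Int) := by
  rw [PySem.Dict.items_counter, List.mem_map]
  constructor
  · rintro ⟨k, hk, rfl⟩
    exact ⟨(PySem.Set.mem_ofList _ _).mp hk, rfl⟩
  · rintro ⟨h1, h2⟩
    exact ⟨q.1, (PySem.Set.mem_ofList _ _).mpr h1, by rw [← h2]⟩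

lemma fmr_count_le_maxv (p : List Char) (k : Char) (h : k ∈ p) :
    (p.count k : Int) ≤ fmrMaxv (PySem.Dict.counter p).items :=
  fmrMaxv_le _ (k, (p.count k : Int)) ((fmr_mem_items_counter p _).mpr ⟨h, rfl⟩)

lemma fmr_maxv_attained_aux (l : List (Char × Int)) :
    fmrMaxv l = 0 ∨ ∃ q ∈ l, q.2 = fmrMaxv l := by
  induction l using List.reverseRecOn with
  | nil => left; rfl
  | append_singleton t q ih =>
    rw [fmrMaxv_append]
    by_cases h : fmrMaxv t ≤ q.2
    · right; exact ⟨q, by simp, by omega⟩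
    · have hm : max (fmrMaxv t) q.2 = fmrMaxv t := by omega
      rw [hm]
      rcases ih with h0 | ⟨q', hq', he⟩
      · left; exact h0
      · right; exact ⟨q', by simp [hq'], he⟩

lemma fmr_maxv_attained (p : List Char) (h : p ≠ []) :
    ∃ k ∈ p, (p.count k : Int) = fmrMaxv (PySem.Dict.counter p).items := by
  rcases fmr_maxv_attained_aux (PySem.Dict.counter p).items with h0 | ⟨q, hq, he⟩
  · obtain ⟨k, hk⟩ := List.exists_mem_of_ne_nil p h
    have h1 := fmr_count_le_maxv p k hk
    have h2 : 1 ≤ p.count k := List.one_le_count_iff.mpr hk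
    rw [h0] at h1
    omega
  · rw [fmr_mem_items_counter] at hq
    exact ⟨q.1, hq.1, by rw [← hq.2, he]⟩
def fmrInv (p : List Char) (m : Int) (b : Char) : Prop :=
  (p = [] ∧ m = 0) ∨
  (p ≠ [] ∧ m = fmrMaxv (PySem.Dict.counter p).items ∧
    b ∈ p ∧ (p.count b : Int) = m ∧
    ∀ x ∈ p, (p.count x : Int) = m → x ≠ b → b < x)

lemma fmr_count_append (p : List Char) (c x : Char) :
    ((p ++ [c]).count x : Int) = (p.count x : Int) + (if x = c then 1 else 0) := by
  rw [List.count_append]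
  push_cast
  by_cases h : x = c <;> simp [h, Ne.symm]

lemma fmr_step_inv (p : List Char) (m : Int) (b c : Char) (h : fmrInv p m b) :
    fmrInv (p ++ [c])
      (if (p.count c : Int) + 1 > m then (p.count c : Int) + 1 else m)
      (if (p.count c : Int) + 1 > m then c
       else if (p.count c : Int) + 1 = m ∧ c < b then c else b) := by
  have hne' : p ++ [c] ≠ [] := by simp
  have hcc_mem : c ∈ p ++ [c] := by simp
  have hcc : ((p ++ [c]).count c : Int) = (p.count c : Int) + 1 := by
    rw [fmr_count_append]; simp
  by_cases hgt : (p.count c : Int) + 1 > m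
  · -- new strict maximum: best becomes c
    have hub : ∀ x ∈ p ++ [c], x ≠ c → ((p ++ [c]).count x : Int) < (p.count c : Int) + 1 := by
      intro x hx hxc
      have hxp : x ∈ p := by
        rcases List.mem_append.mp hx with h1 | h1
        · exact h1
        · simp at h1; exact absurd h1 hxc
      have h1 : ((p ++ [c]).count x : Int) = (p.count x : Int) := by
        rw [fmr_count_append]; simp [hxc]
      rcases h with ⟨hp, hm⟩ | ⟨hp, hm, _⟩
      · subst hp; simp at hxp
      · have := fmr_count_le_maxv p x hxp
        rw [← hm] at this
        omega
    have hM' : fmrMaxv (PySem.Dict.counter (p ++ [c])).items = (p.count c : Int) + 1 := by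
      obtain ⟨k, hk, hke⟩ := fmr_maxv_attained (p ++ [c]) hne'
      have hle := fmr_count_le_maxv (p ++ [c]) c hcc_mem
      rw [hcc] at hle
      by_cases hkc : k = c
      · rw [hkc, hcc] at hke; omega
      · have := hub k hk hkc; omega
    rw [if_pos hgt, if_pos hgt]
    refine Or.inr ⟨hne', hM'.symm, hcc_mem, hcc, ?_⟩
    intro x hx hxe hxc
    exact absurd hxe (by have := hub x hx hxc; omega)
  · -- cc ≤ m: max unchanged
    rcases h with ⟨hp, hm⟩ | ⟨hp, hm, hbp, hbc, hstrict⟩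
    · exfalso; subst hp; simp at hgt; omega
    have hcb : c ≠ b := by
      intro he
      apply hgt
      rw [he, hbc]
      omega
    have hb' : ((p ++ [c]).count b : Int) = m := by
      rw [fmr_count_append]; simp [Ne.symm hcb, hbc]
    have hcount' : ∀ x, x ≠ c → ((p ++ [c]).count x : Int) = (p.count x : Int) := by
      intro x hx; rw [fmr_count_append]; simp [hx]
    have hM' : fmrMaxv (PySem.Dict.counter (p ++ [c])).items = m := by
      obtain ⟨k, hk, hke⟩ := fmr_maxv_attained (p ++ [c]) hne'
      have hge := fmr_count_le_maxv (p ++ [c]) b (by simp [hbp])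
      rw [hb'] at hge
      by_cases hkc : k = c
      · rw [hkc, hcc] at hke; omega
      · have h1 := hcount' k hkc
        have hkp : k ∈ p := by
          rcases List.mem_append.mp hk with h2 | h2
          · exact h2
          · simp at h2; exact absurd h2 hkc
        have := fmr_count_le_maxv p k hkp
        rw [← hm] at this
        omega
    have hmem' : ∀ x ∈ p ++ [c], x ≠ c → x ∈ p := by
      intro x hx hxc
      rcases List.mem_append.mp hx with h1 | h1
      · exact h1
      · simp at h1; exact absurd h1 hxc
    rw [if_neg hgt, if_neg hgt]
    by_cases htie : (p.count c : Int) + 1 = m ∧ c < b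
    · rw [if_pos htie]
      refine Or.inr ⟨hne', hM'.symm, hcc_mem, by omega, ?_⟩
      intro x hx hxe hxc
      have hxp := hmem' x hx hxc
      have hxcount := hcount' x hxc
      by_cases hxb : x = b
      · rw [hxb]; exact htie.2
      · exact lt_trans htie.2 (hstrict x hxp (by omega) hxb)
    · rw [if_neg htie]
      refine Or.inr ⟨hne', hM'.symm, by simp [hbp], hb', ?_⟩
      intro x hx hxe hxb
      by_cases hxc : x = c
      · subst hxc
        rw [hcc] at hxe
        have : ¬ x < b := fun hlt => htie ⟨by omega, hlt⟩
        exact lt_of_le_of_ne (not_lt.mp this) (Ne.symm hxb)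
      · exact hstrict x (hmem' x hx hxc) (by rw [← hcount' x hxc]; omega) hxb
lemma fmr_mem_argmax (p : List Char) (x : Char) (M : Int) :
    x ∈ (((PySem.Dict.counter p).items.filter (fun q => decide (q.2 = M))).map Prod.fst) ↔
      x ∈ p ∧ (p.count x : Int) = M := by
  rw [List.mem_map]
  constructor
  · rintro ⟨q, hq, rfl⟩
    rw [List.mem_filter] at hq
    have h1 := (fmr_mem_items_counter p q).mp hq.1
    have h2 := of_decide_eq_true hq.2
    exact ⟨h1.1, by rw [← h1.2, h2]⟩
  · rintro ⟨h1, h2⟩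
    refine ⟨(x, M), List.mem_filter.mpr ⟨?_, by simp⟩, rfl⟩
    exact (fmr_mem_items_counter p (x, M)).mpr ⟨h1, h2.symm⟩

-- A's step output, given the invariant for the updated prefix
lemma fmr_items_ne_nil (p : List Char) (hp : p ≠ []) :
    ((PySem.Dict.counter p).items.isEmpty) = false := by
  obtain ⟨k, hk⟩ := List.exists_mem_of_ne_nil p hp
  have : (k, (p.count k : Int)) ∈ (PySem.Dict.counter p).items :=
    (fmr_mem_items_counter p _).mpr ⟨hk, rfl⟩
  rw [List.isEmpty_eq_false_iff_exists_mem]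
  exact ⟨_, this⟩
lemma fmr_loop_eq : ∀ (cs : List Char) (i : Int) (p : List Char) (m : Int) (b : Char)
    (acc : List (Int × String × Int)), fmrInv p m b →
    ((PySem.List.enumerate cs i).foldl fmrA_step (PySem.Dict.counter p, acc)).2 =
    ((PySem.List.enumerate cs i).foldl fmrB_step (PySem.Dict.counter p, m, b, acc)).2.2.2 := by
  intro cs
  induction cs with
  | nil => intro i p m b acc _; simp [PySem.List.enumerate_nil]
  | cons c cs ih =>
    intro i p m b acc hinv
    rw [PySem.List.enumerate_cons]
    simp only [List.foldl_cons]
    have hgetD : (PySem.Dict.counter p).getD c 0 = (p.count c : Int) :=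
      PySem.Dict.getD_counter p c
    have hinv' := fmr_step_inv p m b c hinv
    set m' := if (p.count c : Int) + 1 > m then (p.count c : Int) + 1 else m with hm'def
    set b' := if (p.count c : Int) + 1 > m then c
      else if (p.count c : Int) + 1 = m ∧ c < b then c else b with hb'def
    have hins : (PySem.Dict.counter p).insert c ((p.count c : Int) + 1) = PySem.Dict.counter (p ++ [c]) := by
      rw [← hgetD]; exact fmr_counter_step p c
    rcases hinv' with ⟨habs, _⟩ | ⟨_, hm', hbmem, hbcnt, hstrict⟩
    · simp at habs
    have hB : fmrB_step (PySem.Dict.counter p, m, b, acc) (i, c)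
        = (PySem.Dict.counter (p ++ [c]), m', b', acc ++ [(i, String.ofList [b'], m')]) := by
      simp only [fmrB_step, hgetD, hins]
      by_cases h1 : (p.count c : Int) + 1 > m
      · simp [hm'def, hb'def, h1]
      · by_cases h2 : (p.count c : Int) + 1 = m ∧ c < b
        · simp [hm'def, hb'def, h2]
        · simp [hm'def, hb'def, h1, h2]
    have hbL : b' ∈ (((PySem.Dict.counter (p ++ [c])).items.filter
        (fun q => decide (q.2 = fmrMaxv (PySem.Dict.counter (p ++ [c])).items))).map Prod.fst) :=
      (fmr_mem_argmax _ _ _).mpr ⟨hbmem, by rw [hbcnt, hm']⟩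
    have hminL : ∀ x ∈ (((PySem.Dict.counter (p ++ [c])).items.filter
        (fun q => decide (q.2 = fmrMaxv (PySem.Dict.counter (p ++ [c])).items))).map Prod.fst),
        b' ≤ x := by
      intro x hx
      have := (fmr_mem_argmax _ _ _).mp hx
      by_cases hxb : x = b'
      · exact le_of_eq hxb.symm
      · exact le_of_lt (hstrict x this.1 (by rw [this.2, hm']) hxb)
    have hA : fmrA_step (PySem.Dict.counter p, acc) (i, c)
        = (PySem.Dict.counter (p ++ [c]), acc ++ [(i, String.ofList [b'], m')]) := by
      simp only [fmrA_step, hgetD, hins]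
      rw [fmr_items_ne_nil _ (by simp)]
      simp only [Bool.false_eq_true, if_false]
      rw [fmrA_scan_eq, fmr_min?_eq _ b' hbL hminL]
      rw [← hm']
    rw [hA, hB]
    exact ih (i + 1) (p ++ [c]) m' b' _ (Or.inr ⟨by simp, hm', hbmem, hbcnt, hstrict⟩)

-- ===== VERDICT (by name: the statement is the Claim_ definition above) =====
theorem find_max_repeating_char_per_index_spec : Claim_equal_find_max_repeating_char_per_index := by
  intro s _
  unfold Spec_find_max_repeating_char_per_index find_max_repeating_char_per_index
    find_max_repeating_char_per_index_alt
  cases hs : s.toList with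
  | nil => simp [PySem.List.enumerate_nil]
  | cons c0 t =>
    exact fmr_loop_eq (c0 :: t) 0 [] 0 c0 [] (Or.inl ⟨rfl, rfl⟩)
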